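-- pv_equiv track=rewrite | github.com/ResidentMario/mta-data-exploration-old | src/processing.py | synthesize_station_lists
-- ===== SOURCE A (Python) =====
-- def synthesize_station_lists(list_a, list_b):
--     """
--     Pairwise synthesis op. Submethod of the above.
--     """
--     # First, find the pivot.
--     pivot_a = pivot_b = -1
--     for j in range(len(list_a)):
--         station_a = list_a[j]
--         for k in range(len(list_b)):
--             station_b = list_b[k]
--             if station_a == station_b:
--                 pivot_a = j
--                 pivot_b = k
--                 break
--
--     # If we found a pivot...
--     if pivot_a != -1:
--         # ...then the stations that appear before the pivot in the first list, the pivot, and the stations that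
--         # appear after the pivot in the second list should be the ones that are included
--         return list_a[:pivot_a] + list_b[pivot_b:]
--     # If we did not find a pivot...
--     else:
--         # ...then none of the stations that appear in the second list appeared in the first list. This means that the
--         #  train probably cancelled those stations, but it may have stopped there in the meantime also. Add all
--         # stations in the first list and all stations in the second list together.
--         return list_a + list_b
-- ===== SOURCE B (Python) =====
-- def synthesize_station_lists(list_a, list_b):
--     """
--     Pairwise synthesis op: walk list_a backwards and splice at the first
--     (i.e. rightmost) station that also occurs in list_b; O(n+m).
--     """
--     members = set(list_b)
--     for j in range(len(list_a) - 1, -1, -1):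
--         s = list_a[j]
--         if s in members:
--             return list_a[:j] + list_b[list_b.index(s):]
--     return list_a + list_b
-- ===== Notes on version B (the rewrite author's own statement) =====
-- stated objective: faster
-- what changed: Instead of A's nested forward scans that keep overwriting the pivot, B walks list_a backwards and returns at the first station found in a set of list_b (the rightmost match), locating its position in list_b with a single index() call.
import Mathlib
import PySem

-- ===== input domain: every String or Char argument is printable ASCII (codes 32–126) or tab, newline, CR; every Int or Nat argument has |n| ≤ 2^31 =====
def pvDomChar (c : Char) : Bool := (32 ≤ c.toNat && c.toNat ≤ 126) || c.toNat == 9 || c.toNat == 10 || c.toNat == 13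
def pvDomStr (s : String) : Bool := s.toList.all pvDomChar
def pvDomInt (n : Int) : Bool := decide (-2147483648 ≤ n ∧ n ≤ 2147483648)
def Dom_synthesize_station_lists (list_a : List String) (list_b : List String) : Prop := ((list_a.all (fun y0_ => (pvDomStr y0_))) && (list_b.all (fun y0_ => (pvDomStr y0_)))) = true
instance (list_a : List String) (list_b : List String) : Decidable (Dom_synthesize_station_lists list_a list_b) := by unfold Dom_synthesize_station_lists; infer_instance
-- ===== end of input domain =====

-- B walks list_a BACKWARDS and returns at the first station that lies in set(list_b), instead of A's nested forward scans; O(n+m) vs O(n*m).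

-- ===== PORT A =====
-- inner loop: 'for k in range(len(list_b)): station_b = list_b[k]; if station_a == station_b: pivot = (j, k); break'
def sslInner (sa : String) (j : Int) : List String → Int → (Int × Int) → (Int × Int)
  | [], _, st => st
  | sb :: rest, k, st => if sa == sb then (j, k) else sslInner sa j rest (k + 1) st

-- outer loop: 'for j in range(len(list_a)): station_a = list_a[j]; <inner>'
def sslOuter (list_b : List String) : List String → Int → (Int × Int) → (Int × Int)
  | [], _, st => st
  | sa :: rest, j, st => sslOuter list_b rest (j + 1) (sslInner sa j list_b 0 st)

def synthesize_station_lists (list_a : List String) (list_b : List String) : List String :=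
  let piv := sslOuter list_b list_a 0 (-1, -1)
  if piv.1 != -1 then
    PySem.List.slice list_a none (some piv.1) ++ PySem.List.slice list_b (some piv.2) none
  else
    list_a ++ list_b

-- ===== PORT B =====
-- 'for j in range(len(list_a)-1, -1, -1): s = list_a[j]; if s in members: return list_a[:j] + list_b[list_b.index(s):]'
-- ported as a recursion over the reversed enumeration of list_a (same visiting order j = n-1 … 0);
-- list_b.index(s) cannot fail when s ∈ members, so .getD 0 is never the default on that branch
def sslBack (la lb : List String) (members : PySem.Set String) : List (Int × String) → List String
  | [] => la ++ lb
  | (j, s) :: rest =>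
      if members.contains s then
        PySem.List.slice la none (some j) ++
        PySem.List.slice lb (some (((PySem.List.index? lb s).getD 0 : Nat) : Int)) none
      else sslBack la lb members rest

def synthesize_station_lists_alt (list_a : List String) (list_b : List String) : List String :=
  sslBack list_a list_b (PySem.Set.ofList list_b) (PySem.List.enumerate list_a 0).reverse

-- ===== PRECONDITION & SPEC =====
def Spec_synthesize_station_lists (list_a : List String) (list_b : List String) (out : List String) : Prop := out = synthesize_station_lists_alt list_a list_b
instance (list_a : List String) (list_b : List String) (out : List String) : Decidable (Spec_synthesize_station_lists list_a list_b out) := by unfold Spec_synthesize_station_lists; infer_instance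

-- ===== CLAIM (what is proved, stated in full; the proofs are below) =====
def Claim_equal_synthesize_station_lists : Prop := ∀ (list_a : List String) (list_b : List String), Dom_synthesize_station_lists list_a list_b → Spec_synthesize_station_lists list_a list_b (synthesize_station_lists list_a list_b)

-- ===== LEMMAS AND PROOFS =====

-- first index of s in a list, counting from k: the pivot_b both programs agree on
def sslFind (s : String) : List String → Int → Option Int
  | [], _ => none
  | b :: rest, k => if s == b then some k else sslFind s rest (k + 1)

-- the last match over an enumeration (the value A's overwriting loop ends with)
def sslStep (lb : List String) (acc : Option (Int × Int)) (p : Int × String) : Option (Int × Int) :=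
  match sslFind p.2 lb 0 with
  | some k => some (p.1, k)
  | none => acc

theorem sslInner_eq_find (sa : String) (j : Int) (lb : List String) (k : Int) (st : Int × Int) :
    sslInner sa j lb k st = match sslFind sa lb k with
      | some kk => (j, kk)
      | none => st := by
  induction lb generalizing k with
  | nil => simp [sslInner, sslFind]
  | cons b rest ih =>
      simp only [sslInner, sslFind]
      by_cases h : sa == b
      · simp [h]
      · simp [h, ih]

theorem sslFind_eq_index? (s : String) (lb : List String) (k : Int) :
    sslFind s lb k = (PySem.List.index? lb s).map (fun n => k + n) := by
  induction lb generalizing k with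
  | nil =>
      have h0 : PySem.List.index? ([] : List String) s = none :=
        (PySem.List.index?_eq_none_iff [] s).mpr (by simp)
      simp [sslFind]
  | cons b rest ih =>
      simp only [sslFind]
      by_cases h : s = b
      · subst h
        rw [PySem.List.index?_cons_self]
        simp
      · have hb : b ≠ s := fun hh => h hh.symm
        rw [PySem.List.index?_cons_of_ne rest hb]
        have hbe : (s == b) = false := by simp [h]
        simp only [hbe, Bool.false_eq_true, if_false, ih]
        cases PySem.List.index? rest s with
        | none => rfl
        | some n => simp; omega

theorem sslFind_isSome_iff (s : String) (lb : List String) :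
    (sslFind s lb 0).isSome ↔ s ∈ lb := by
  rw [sslFind_eq_index?, ← PySem.List.index?_isSome_iff lb s]
  cases PySem.List.index? lb s <;> simp

-- relation between A's pivot pair and the last-match option
def sslRel (st : Int × Int) (p : Option (Int × Int)) : Prop :=
  (p = none ∧ st = (-1, -1)) ∨ (∃ j k, p = some (j, k) ∧ st = (j, k) ∧ 0 ≤ j)

theorem sslLoop_rel (lb : List String) (la : List String) (j : Int) (hj : 0 ≤ j)
    (st : Int × Int) (p : Option (Int × Int)) (hr : sslRel st p) :
    sslRel (sslOuter lb la j st)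
      ((PySem.List.enumerate la j).foldl (sslStep lb) p) := by
  induction la generalizing j st p with
  | nil => simpa [sslOuter, PySem.List.enumerate]
  | cons sa rest ih =>
      rw [PySem.List.enumerate_cons]
      simp only [sslOuter, List.foldl_cons, sslStep]
      rw [sslInner_eq_find]
      cases hf : sslFind sa lb 0 with
      | none => exact ih (j + 1) (by omega) st p hr
      | some k =>
          exact ih (j + 1) (by omega) (j, k) (some (j, k)) (Or.inr ⟨j, k, rfl, rfl, hj⟩)

-- B's backward early-exit scan computes the last match of the forward fold
theorem sslBack_eq_last (la lb : List String) (l : List (Int × String)) :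
    sslBack la lb (PySem.Set.ofList lb) l.reverse =
      match l.foldl (sslStep lb) none with
      | none => la ++ lb
      | some (j, k) =>
          PySem.List.slice la none (some j) ++ PySem.List.slice lb (some k) none := by
  induction l using List.reverseRecOn with
  | nil => simp [sslBack]
  | append_singleton ys x ih =>
      rcases x with ⟨j, s⟩
      rw [List.reverse_append]
      simp only [List.reverse_singleton, List.singleton_append, sslBack,
        List.foldl_append, List.foldl_cons, List.foldl_nil]
      by_cases hm : s ∈ lb
      · have hc : (PySem.Set.ofList lb).contains s = true :=
          List.elem_eq_true_of_mem ((PySem.Set.mem_ofList lb s).mpr hm)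
        cases hi : PySem.List.index? lb s with
        | none =>
            exact absurd ((PySem.List.index?_eq_none_iff lb s).mp hi) (by simp [hm])
        | some n =>
            have hf : sslFind s lb 0 = some (n : Int) := by
              rw [sslFind_eq_index?, hi]; simp
            simp only [hc, if_true, sslStep, hf, Option.getD_some]
      · have hc : (PySem.Set.ofList lb).contains s = false := by
          rw [Bool.eq_false_iff]
          intro h
          exact hm ((PySem.Set.mem_ofList lb s).mp (List.mem_of_elem_eq_true h))
        have hf : sslFind s lb 0 = none := by
          cases hg : sslFind s lb 0 with
          | none => rfl
          | some k =>
              exact absurd ((sslFind_isSome_iff s lb).mp (by rw [hg]; rfl)) hm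
        simp only [hc, Bool.false_eq_true, if_false, sslStep, hf, ih]

-- ===== VERDICT (by name: the statement is the Claim_ definition above) =====
theorem synthesize_station_lists_spec : Claim_equal_synthesize_station_lists := by
  intro la lb _
  unfold Spec_synthesize_station_lists synthesize_station_lists synthesize_station_lists_alt
  rw [sslBack_eq_last]
  have h := sslLoop_rel lb la 0 (by omega) (-1, -1) none (Or.inl ⟨rfl, rfl⟩)
  rcases h with ⟨hp, hst⟩ | ⟨j, k, hp, hst, hj⟩
  · rw [hp, hst]; simp
  · rw [hp, hst]
    have : (j != -1) = true := by simp; omega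
    simp [this]
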